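-- pv_equiv track=rewrite | github.com/mikedotexe/reptends | bridge_reptends/analysis.py | find_qr_strides
-- ===== SOURCE A (Python) =====
-- from math import gcd
-- from typing import Optional
--
-- def multiplicative_order(a: int, n: int) -> Optional[int]:
--     """
--     Compute ord_n(a) - the multiplicative order of a modulo n.
--
--     Returns the smallest positive integer m such that a^m ≡ 1 (mod n),
--     or None if gcd(a, n) ≠ 1.
--
--     Works for any modulus n (not just primes). By Lagrange's theorem,
--     ord_n(a) divides |G| for any finite group G.
--     """
--     if gcd(a, n) != 1:
--         return None
--
--     order = 1
--     val = a % n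
--     while val != 1:
--         val = (val * a) % n
--         order += 1
--         if order > n:
--             return None  # Shouldn't happen for coprime a, n
--     return order
--
-- def find_qr_strides(p: int, base: int) -> list[int]:
--     """
--     Find all strides m where base^m is a QR-generator mod p.
--
--     Let r = ord_p(base) and half = (p-1)/2. Then
--
--         ord_p(base^m) = r / gcd(r, m).
--
--     So base^m is a QR-generator exactly when
--
--         r / gcd(r, m) = half.
--
--     This gives an exact classification:
--     QR-generating strides exist iff r is half or 2*half = p-1.
--
--     Returns sorted list of stride values.
--     """
--     reptend_len = multiplicative_order(base, p)
--     if reptend_len is None: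
--         return []
--
--     half = (p - 1) // 2
--     return [
--         m
--         for m in range(1, reptend_len + 1)
--         if reptend_len // gcd(reptend_len, m) == half
--     ]
-- ===== SOURCE B (Python) =====
-- from math import gcd
--
-- def find_qr_strides(p: int, base: int) -> list[int]:
--     half = (p - 1) // 2
--     if half <= 0:
--         return []
--     r = next((m for m in range(1, p + 1) if pow(base, m, p) == 1), None)
--     if r is None or r % half != 0:
--         return []
--     target = r // half
--     return [target * k for k in range(1, half + 1) if gcd(half, k) == 1]
-- ===== Notes on version B (the rewrite author's own statement) =====
-- stated objective: simpler
-- what changed: B drops the multiplicative_order helper and the brute filter of every m in [1,r]: it finds the order as the first m in [1,p] with pow(base,m,p)==1 and, after guarding half>0 and half | r, directly enumerates the strides as target*k for k in [1,half] coprime to half; Pre_ only excludes p=0 with base=+-1, where A raises ZeroDivisionError (B returns []).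
import Mathlib
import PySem

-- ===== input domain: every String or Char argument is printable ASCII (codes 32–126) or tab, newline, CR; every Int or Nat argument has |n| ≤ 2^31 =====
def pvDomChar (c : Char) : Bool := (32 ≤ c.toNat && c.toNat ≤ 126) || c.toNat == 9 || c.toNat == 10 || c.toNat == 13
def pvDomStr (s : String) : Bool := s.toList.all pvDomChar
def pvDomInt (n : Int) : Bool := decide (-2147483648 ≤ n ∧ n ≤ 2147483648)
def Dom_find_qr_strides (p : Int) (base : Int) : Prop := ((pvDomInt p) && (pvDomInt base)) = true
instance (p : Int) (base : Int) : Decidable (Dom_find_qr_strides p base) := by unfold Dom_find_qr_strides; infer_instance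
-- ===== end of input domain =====

-- B drops A's multiply-accumulate order loop and brute filter of m ∈ [1,r]: it finds the order
-- as the first m ∈ [1,p] with base^m % p == 1 (modular pow) and directly enumerates the strides
-- as target*k for k ∈ [1,half] coprime to half (simpler; return value identical on Pre_).

-- ===== PORT A =====
-- the while-loop of multiplicative_order, with enough fuel never to run out
-- (each iteration either returns or increments order, and order > n aborts, so ≤ n.toNat+2 calls happen)
def mo_loop (a n : Int) : Nat → Int → Int → Option Int
  | 0, _, _ => none
  | fuel + 1, val, order =>
    if val = 1 then some order
    else
      let val' := PySem.Int.mod (val * a) n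
      let order' := order + 1
      if n < order' then none else mo_loop a n fuel val' order'

def multiplicative_order (a : Int) (n : Int) : Option Int :=
  if (Int.gcd a n : Int) ≠ 1 then none
  else mo_loop a n (n.toNat + 2) (PySem.Int.mod a n) 1

def find_qr_strides (p : Int) (base : Int) : List Int :=
  match multiplicative_order base p with
  | none => []
  | some reptend_len =>
    let half := PySem.Int.floordiv (p - 1) 2
    (PySem.List.pyRange 1 (reptend_len + 1) 1).filter
      (fun m => PySem.Int.floordiv reptend_len (Int.gcd reptend_len m : Int) == half)

-- ===== PORT B =====
-- pow(base, m, p) is ported exactly as base^m % p (Python's three-argument pow for m ≥ 0, p > 0;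
-- B only calls it under the half > 0 guard, i.e. p ≥ 3)
def find_qr_strides_alt (p : Int) (base : Int) : List Int :=
  let half := PySem.Int.floordiv (p - 1) 2
  if half ≤ 0 then []
  else
    match (PySem.List.pyRange 1 (p + 1) 1).find?
        (fun m => PySem.Int.mod (base ^ m.toNat) p == 1) with
    | none => []
    | some r =>
      if PySem.Int.mod r half ≠ 0 then []
      else
        let target := PySem.Int.floordiv r half
        ((PySem.List.pyRange 1 (half + 1) 1).filter
          (fun k => (Int.gcd half k : Int) == 1)).map (fun k => target * k)

-- ===== PRECONDITION & SPEC =====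
-- Pre_ excludes only p = 0 with base = ±1, where the Python A raises ZeroDivisionError in a % n.
def Pre_find_qr_strides (p : Int) (base : Int) : Prop := ¬ (p = 0 ∧ (base = 1 ∨ base = -1))
instance (p : Int) (base : Int) : Decidable (Pre_find_qr_strides p base) := by unfold Pre_find_qr_strides; infer_instance
def pvWitness_find_qr_strides : Int × Int := (7, 3)

def Spec_find_qr_strides (p : Int) (base : Int) (out : List Int) : Prop := out = find_qr_strides_alt p base
instance (p : Int) (base : Int) (out : List Int) : Decidable (Spec_find_qr_strides p base out) := by unfold Spec_find_qr_strides; infer_instance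

-- ===== CLAIM (what is proved, stated in full; the proofs are below) =====
def Claim_equal_find_qr_strides : Prop := ∀ (p : Int) (base : Int), Dom_find_qr_strides p base → Pre_find_qr_strides p base → Spec_find_qr_strides p base (find_qr_strides p base)

-- ===== LEMMAS AND PROOFS =====

-- A's while-loop, started at val = a^j % p, is exactly the first m ∈ [j, p] with a^m % p == 1
lemma mo_loop_find (a p : Int) (hp : 1 ≤ p) : ∀ (fuel : Nat) (j : Int), 1 ≤ j → j ≤ p →
    p.toNat + 2 ≤ j.toNat + fuel →
    mo_loop a p fuel (PySem.Int.mod (a ^ j.toNat) p) j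
      = (PySem.List.pyRange j (p + 1) 1).find? (fun m => PySem.Int.mod (a ^ m.toNat) p == 1) := by
  intro fuel
  induction fuel with
  | zero =>
    intro j hj1 hjp hfuel
    have : j.toNat ≤ p.toNat := Int.toNat_le_toNat hjp
    omega
  | succ fuel ih =>
    intro j hj1 hjp hfuel
    rw [PySem.List.pyRange_one_cons (by omega)]
    by_cases hv : PySem.Int.mod (a ^ j.toNat) p = 1
    · rw [List.find?_cons_of_pos (by simp [hv])]
      simp [mo_loop, hv]
    · rw [List.find?_cons_of_neg (by simp [hv])]
      unfold mo_loop
      simp only [hv, if_false]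
      by_cases hend : p < j + 1
      · rw [if_pos hend, PySem.List.pyRange_one_eq_nil (by omega)]
        rfl
      · rw [if_neg hend]
        have hval : PySem.Int.mod (PySem.Int.mod (a ^ j.toNat) p * a) p
            = PySem.Int.mod (a ^ (j + 1).toNat) p := by
          have hp0 : (0:Int) < p := by omega
          simp only [PySem.Int.mod_eq_emod_of_pos hp0]
          have h1 : (j + 1).toNat = j.toNat + 1 := by omega
          rw [h1, pow_succ]
          conv_lhs => rw [Int.mul_emod, Int.emod_emod_of_dvd _ (dvd_refl p), ← Int.mul_emod]
        rw [hval]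
        exact ih (j + 1) (by omega) (by omega) (by omega)

-- the order computation of A equals B's first-match search, outside the excluded input
lemma ord_eq (p base : Int) (hpre : ¬ (p = 0 ∧ (base = 1 ∨ base = -1))) :
    multiplicative_order base p
      = (PySem.List.pyRange 1 (p + 1) 1).find? (fun m => PySem.Int.mod (base ^ m.toNat) p == 1) := by
  unfold multiplicative_order
  rcases lt_trichotomy p 0 with hneg | hzero | hpos
  · -- p < 0: both none
    rw [PySem.List.pyRange_one_eq_nil (by omega)]
    by_cases hg : (Int.gcd base p : Int) ≠ 1
    · simp [hg]
    · simp only [hg, if_false]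
      have h0 : PySem.Int.mod base p ≤ 0 := (PySem.Int.mod_neg_bounds base hneg).2
      have hfuel : p.toNat + 2 = 2 := by omega
      rw [hfuel]
      unfold mo_loop
      rw [if_neg (by omega)]
      simp only [if_pos (show p < 1 + 1 by omega)]
      rfl
  · -- p = 0: gcd(base, 0) = |base| ≠ 1 since base ≠ ±1
    subst hzero
    have hb : base ≠ 1 ∧ base ≠ -1 := by tauto
    have hg : (Int.gcd base 0 : Int) ≠ 1 := by
      simp only [Int.gcd_zero_right, ne_eq]
      intro h
      rcases Int.natAbs_eq base with he | he <;> omega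
    rw [PySem.List.pyRange_one_eq_nil (by omega), if_pos hg]
    rfl
  · -- p ≥ 1
    by_cases hg : (Int.gcd base p : Int) ≠ 1
    · -- base not invertible: no power is ≡ 1 (mod p)
      rw [if_pos hg]
      symm
      rw [List.find?_eq_none]
      intro m hm
      rw [PySem.List.mem_pyRange_one] at hm
      simp only [beq_iff_eq]
      intro hmod
      rw [PySem.Int.mod_eq_emod_of_pos hpos] at hmod
      have hdvd : p ∣ base ^ m.toNat - 1 := by
        have := Int.emod_def (base ^ m.toNat) p
        exact ⟨base ^ m.toNat / p, by omega⟩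
      have hg1 : (Int.gcd base p : Int) ∣ base ^ m.toNat :=
        dvd_pow (Int.gcd_dvd_left base p) (by omega)
      have hg2 : (Int.gcd base p : Int) ∣ base ^ m.toNat - 1 :=
        dvd_trans (Int.gcd_dvd_right base p) hdvd
      have hgd1 : (Int.gcd base p : Int) ∣ 1 := by
        have hsub := dvd_sub hg1 hg2
        simpa using hsub
      have hle := Int.le_of_dvd one_pos hgd1
      have hnn : (0:Int) ≤ (Int.gcd base p : Int) := Int.natCast_nonneg _
      have hne : (Int.gcd base p : Int) ≠ 0 := by
        simp only [ne_eq, Int.natCast_eq_zero, Int.gcd_eq_zero_iff, not_and]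
        intro _; omega
      exact hg (by omega)
    · simp only [hg, if_false]
      have := mo_loop_find base p (by omega) (p.toNat + 2) 1 (by omega) (by omega) (by omega)
      simpa using this

-- the core list identity, on the `some r` branch (brute filter = derived enumeration)
lemma core_eq (r half : Int) (hr : 1 ≤ r) :
    (PySem.List.pyRange 1 (r + 1) 1).filter
        (fun m => PySem.Int.floordiv r (Int.gcd r m : Int) == half) =
      (if half ≤ 0 then ([] : List Int)
       else if PySem.Int.mod r half ≠ 0 then []
       else ((PySem.List.pyRange 1 (half + 1) 1).filter
          (fun k => (Int.gcd half k : Int) == 1)).map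
          (fun k => PySem.Int.floordiv r half * k)) := by
  have gpos : ∀ m : Int, 0 < (Int.gcd r m : Int) := by
    intro m
    have : Int.gcd r m ≠ 0 := by
      simp only [ne_eq, Int.gcd_eq_zero_iff, not_and]
      intro h; omega
    exact_mod_cast Nat.pos_of_ne_zero this
  by_cases hh : half ≤ 0
  · rw [if_pos hh]
    refine List.filter_eq_nil_iff.mpr ?_
    intro m hm
    simp only [beq_iff_eq]
    have hge : (Int.gcd r m : Int) ≤ r := Int.le_of_dvd (by omega) (Int.gcd_dvd_left r m)
    have h1 : 1 ≤ PySem.Int.floordiv r (Int.gcd r m : Int) := by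
      rw [PySem.Int.le_floordiv_iff_mul_le (gpos m)]; omega
    omega
  rw [if_neg hh]
  rw [not_le] at hh
  by_cases hd : half ∣ r
  swap
  · rw [if_pos (by simpa [PySem.Int.mod_eq_zero_iff_dvd] using hd)]
    refine List.filter_eq_nil_iff.mpr ?_
    intro m hm
    simp only [beq_iff_eq]
    intro hfe
    rw [PySem.Int.floordiv_eq_ediv_of_pos (gpos m)] at hfe
    have := Int.ediv_mul_cancel (Int.gcd_dvd_left r m)
    rw [hfe] at this
    exact hd ⟨_, this.symm⟩
  · rw [if_neg (by simpa [PySem.Int.mod_eq_zero_iff_dvd] using hd)]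
    obtain ⟨t, ht⟩ := hd
    have htpos : 0 < t := by nlinarith
    have htarget : PySem.Int.floordiv r half = t := by
      rw [PySem.Int.floordiv_eq_ediv_of_pos hh, ht, Int.mul_ediv_cancel_left t (by omega)]
    rw [htarget]
    have s1 : ((PySem.List.pyRange 1 (r + 1) 1).filter
        (fun m => PySem.Int.floordiv r (Int.gcd r m : Int) == half)).Pairwise (· < ·) :=
      (PySem.List.pairwise_lt_pyRange_one 1 (r+1)).filter _
    have s2' : ((PySem.List.pyRange 1 (half + 1) 1).filter
        (fun k => (Int.gcd half k : Int) == 1)).Pairwise (· < ·) :=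
      (PySem.List.pairwise_lt_pyRange_one 1 (half+1)).filter _
    have s2 : (((PySem.List.pyRange 1 (half + 1) 1).filter
        (fun k => (Int.gcd half k : Int) == 1)).map (fun k => t * k)).Pairwise (· < ·) :=
      s2'.map _ (fun a b hab => by nlinarith)
    have mem : ∀ x : Int, x ∈ (PySem.List.pyRange 1 (r + 1) 1).filter
        (fun m => PySem.Int.floordiv r (Int.gcd r m : Int) == half) ↔
        x ∈ ((PySem.List.pyRange 1 (half + 1) 1).filter
          (fun k => (Int.gcd half k : Int) == 1)).map (fun k => t * k) := by
      intro x
      simp only [List.mem_filter, List.mem_map, PySem.List.mem_pyRange_one, beq_iff_eq]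
      constructor
      · rintro ⟨⟨hx1, hx2⟩, hfe⟩
        rw [PySem.Int.floordiv_eq_ediv_of_pos (gpos x)] at hfe
        have hcan := Int.ediv_mul_cancel (Int.gcd_dvd_left r x)
        rw [hfe] at hcan
        have hgt : (Int.gcd r x : Int) = t := by
          have : half * (Int.gcd r x : Int) = half * t := by rw [hcan, ht]
          exact mul_left_cancel₀ (by omega) this
        have hdvdx : t ∣ x := hgt ▸ Int.gcd_dvd_right r x
        obtain ⟨k, hk⟩ := hdvdx
        have hk1 : 1 ≤ k := by nlinarith
        refine ⟨k, ⟨⟨hk1, by nlinarith⟩, ?_⟩, hk.symm⟩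
        have hgmul : Int.gcd (t * half) (t * k) = t.natAbs * Int.gcd half k :=
          Int.gcd_mul_left t half k
        have hr' : r = t * half := by linarith [ht, mul_comm half t]
        have : (Int.gcd r x : Int) = (t.natAbs : Int) * (Int.gcd half k : Int) := by
          rw [hr', hk, hgmul]; push_cast; ring
        rw [hgt, Int.natAbs_of_nonneg (by omega)] at this
        have : (Int.gcd half k : Int) = 1 := by
          have h' : t * 1 = t * (Int.gcd half k : Int) := by linarith
          exact (mul_left_cancel₀ (by omega) h').symm
        exact this
      · rintro ⟨k, ⟨⟨hk1, hk2⟩, hgk⟩, hxk⟩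
        subst hxk
        have hr' : r = t * half := by linarith [ht, mul_comm half t]
        refine ⟨⟨by nlinarith, by nlinarith⟩, ?_⟩
        have hgmul : (Int.gcd r (t * k) : Int) = t := by
          rw [hr', Int.gcd_mul_left]
          push_cast [hgk]
          simp [abs_of_pos htpos]
        rw [hgmul, PySem.Int.floordiv_eq_ediv_of_pos htpos, hr', Int.mul_ediv_cancel_left half (by omega)]
    exact PySem.List.eq_of_perm_of_pairwise_le
      ((List.perm_ext_iff_of_nodup (s1.imp ne_of_lt) (s2.imp ne_of_lt)).mpr mem)
      (s1.imp le_of_lt) (s2.imp le_of_lt)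

theorem find_qr_strides_eq (p base : Int) (hpre : Pre_find_qr_strides p base) :
    find_qr_strides p base = find_qr_strides_alt p base := by
  unfold find_qr_strides find_qr_strides_alt
  rw [ord_eq p base hpre]
  cases h : (PySem.List.pyRange 1 (p + 1) 1).find?
      (fun m => PySem.Int.mod (base ^ m.toNat) p == 1) with
  | none => simp
  | some r =>
    have hr : 1 ≤ r := by
      have hmem := List.mem_of_find?_eq_some h
      rw [PySem.List.mem_pyRange_one] at hmem
      omega
    simp only
    rw [core_eq r (PySem.Int.floordiv (p - 1) 2) hr]

-- ===== VERDICT (by name: the statements are the Claim_ definitions above) =====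
theorem find_qr_strides_spec : Claim_equal_find_qr_strides := by
  intro p base _ hpre
  unfold Spec_find_qr_strides
  exact find_qr_strides_eq p base hpre
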